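-- pv_equiv track=rewrite | github.com/rjrajivjha/parking_lot | src/models/slot_set.py | slots_by_type
-- ===== SOURCE A (Python) =====
-- def slots_by_type(size_by_type):
--     slot_numbers = {}
--     slot_count = 1
--
--     for vehicle_type, capacity in size_by_type.items():
--         slots = set(range(slot_count, slot_count + capacity))
--         slot_numbers[vehicle_type] = slots
--         slot_count += capacity
--
--     return slot_numbers
-- ===== SOURCE B (Python) =====
-- def slots_by_type(size_by_type):
--     items = list(size_by_type.items())
--     caps = [c for _, c in items]
--     return {t: set(range(1 + sum(caps[:i]), 1 + sum(caps[:i]) + c))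
--             for i, (t, c) in enumerate(items)}
-- ===== Notes on version B (the rewrite author's own statement) =====
-- stated objective: alternative
-- what changed: Replaces the running slot_count accumulator with a per-index closed form: each type's start is computed independently as 1 plus the sum of the preceding capacities, and the result is built in one independent mapping pass over enumerate(items).
import Mathlib
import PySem

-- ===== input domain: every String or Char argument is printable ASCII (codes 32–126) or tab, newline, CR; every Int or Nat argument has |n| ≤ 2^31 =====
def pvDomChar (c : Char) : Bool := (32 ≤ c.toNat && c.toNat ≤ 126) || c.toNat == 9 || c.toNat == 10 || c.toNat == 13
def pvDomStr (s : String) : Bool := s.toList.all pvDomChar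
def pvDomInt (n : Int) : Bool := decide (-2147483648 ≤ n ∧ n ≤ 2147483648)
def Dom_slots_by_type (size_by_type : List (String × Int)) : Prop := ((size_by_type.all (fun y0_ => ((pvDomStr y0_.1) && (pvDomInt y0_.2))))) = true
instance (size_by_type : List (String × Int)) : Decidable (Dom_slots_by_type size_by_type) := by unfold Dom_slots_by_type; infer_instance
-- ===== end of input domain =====

-- B replaces A's running slot_count accumulator with a per-index closed form (start = 1 + sum of
-- preceding capacities) computed in one independent mapping pass; alternative decomposition, not faster.


-- ===== PORT A =====
-- the Python parameter is a dict: the association list is read as that dict (Dict.ofList, Python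
-- duplicate-key collapse), then A's loop over .items() runs with the (dict, slot_count) state
def slots_by_type (size_by_type : List (String × Int)) : List (String × List Int) :=
  let items := (PySem.Dict.ofList size_by_type).items
  (items.foldl
    (fun (acc : PySem.Dict String (List Int) × Int) tc =>
      let slots := PySem.Set.ofList (PySem.List.pyRange acc.2 (acc.2 + tc.2) 1)
      (acc.1.insert tc.1 slots, acc.2 + tc.2))
    (PySem.Dict.empty, 1)).1.items

-- ===== PORT B =====
-- caps[:i] with the nonnegative enumerate index i is exactly List.take i
def slots_by_type_alt (size_by_type : List (String × Int)) : List (String × List Int) :=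
  let items := (PySem.Dict.ofList size_by_type).items
  let caps := items.map (·.2)
  (PySem.List.enumerate items 0).map (fun p =>
    let s := 1 + (caps.take p.1.toNat).sum
    (p.2.1, PySem.Set.ofList (PySem.List.pyRange s (s + p.2.2) 1)))

-- ===== PRECONDITION & SPEC =====
def Spec_slots_by_type (size_by_type : List (String × Int)) (out : List (String × List Int)) : Prop := out = slots_by_type_alt size_by_type
instance (size_by_type : List (String × Int)) (out : List (String × List Int)) : Decidable (Spec_slots_by_type size_by_type out) := by unfold Spec_slots_by_type; infer_instance

-- ===== CLAIM (what is proved, stated in full; the proofs are below) =====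
def Claim_equal_slots_by_type : Prop := ∀ (size_by_type : List (String × Int)), Dom_slots_by_type size_by_type → Spec_slots_by_type size_by_type (slots_by_type size_by_type)

-- ===== LEMMAS AND PROOFS =====

-- the common shape both loops compute: consecutive range-sets with a running start
def pvG (c : Int) : List (String × Int) → List (String × List Int)
  | [] => []
  | (t, cap) :: rest =>
      (t, PySem.Set.ofList (PySem.List.pyRange c (c + cap) 1)) :: pvG (c + cap) rest

theorem pvLoopA (l : List (String × Int)) (d : PySem.Dict String (List Int)) (c : Int)
    (hfr : ∀ p ∈ l, d.contains p.1 = false) (hnd : (l.map (·.1)).Nodup) :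
    (l.foldl
      (fun (acc : PySem.Dict String (List Int) × Int) tc =>
        (acc.1.insert tc.1 (PySem.Set.ofList (PySem.List.pyRange acc.2 (acc.2 + tc.2) 1)),
         acc.2 + tc.2))
      (d, c)).1.items = d.items ++ pvG c l := by
  induction l generalizing d c with
  | nil => simp [pvG]
  | cons p rest ih =>
      obtain ⟨t, cap⟩ := p
      simp only [List.foldl_cons, pvG]
      have hd : d.contains t = false := hfr (t, cap) (by simp)
      have hnd' : (rest.map (·.1)).Nodup := (List.nodup_cons.mp (by simpa using hnd)).2
      have htn : t ∉ rest.map (·.1) := (List.nodup_cons.mp (by simpa using hnd)).1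
      rw [ih _ _ ?_ hnd']
      · simp [PySem.Dict.items_insert, hd]
      · intro q hq
        rw [PySem.Dict.contains_insert]
        have h1 : d.contains q.1 = false := hfr q (List.mem_cons_of_mem _ hq)
        have h2 : q.1 ≠ t := fun h => htn (h ▸ List.mem_map_of_mem hq)
        simp [h1, h2]

theorem pvLoopB (l : List (String × Int)) (k : Nat) (caps : List Int)
    (hdrop : caps.drop k = l.map (·.2)) :
    (PySem.List.enumerate l (k : Int)).map (fun p =>
        (p.2.1, PySem.Set.ofList (PySem.List.pyRange (1 + (caps.take p.1.toNat).sum)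
          (1 + (caps.take p.1.toNat).sum + p.2.2) 1)))
      = pvG (1 + (caps.take k).sum) l := by
  induction l generalizing k with
  | nil => simp [pvG]
  | cons p rest ih =>
      obtain ⟨t, cap⟩ := p
      have hk : k < caps.length := by
        by_contra h
        rw [List.drop_eq_nil_of_le (by omega)] at hdrop
        simp at hdrop
      have hget : caps[k]? = some cap := by
        rw [← List.head?_drop, hdrop]
        rfl
      have hsum : (caps.take (k + 1)).sum = (caps.take k).sum + cap := by
        rw [List.take_add_one, hget]
        simp
      have hdrop' : caps.drop (k + 1) = rest.map (·.2) := by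
        have : caps.drop (k + 1) = (caps.drop k).drop 1 := by
          rw [List.drop_drop]
        rw [this, hdrop]
        simp
      rw [PySem.List.enumerate_cons]
      simp only [List.map_cons, pvG, Int.toNat_natCast]
      refine congrArg₂ List.cons rfl ?_
      have h2 := ih (k + 1) hdrop'
      rw [hsum] at h2
      rw [add_assoc, show ((k : Int) + 1) = ((k + 1 : Nat) : Int) by push_cast; ring]
      exact h2

theorem pvMain (l : List (String × Int)) :
    slots_by_type l = slots_by_type_alt l := by
  unfold slots_by_type slots_by_type_alt
  dsimp only
  have hnd : ((PySem.Dict.ofList l).items.map (·.1)).Nodup := by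
    have := PySem.Dict.nodup_keys_ofList (ps := l)
    simpa [PySem.Dict.keys] using this
  rw [pvLoopA _ _ _ (by simp [PySem.Dict.contains_empty]) hnd]
  have hb := pvLoopB (PySem.Dict.ofList l).items 0
    ((PySem.Dict.ofList l).items.map (·.2)) (by simp)
  simp only [Nat.cast_zero, List.take_zero, List.sum_nil, add_zero] at hb
  rw [hb]
  rfl

-- ===== VERDICT (by name: the statement is the Claim_ definition above) =====
theorem slots_by_type_spec : Claim_equal_slots_by_type := by
  intro l _
  unfold Spec_slots_by_type
  exact pvMain l
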